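-- pv_equiv track=rewrite | github.com/Anteneh-T-Tessema/legalairag | ingestion/pipeline/chunker.py | _tail_to_fit
-- ===== SOURCE A (Python) =====
-- def _tail_to_fit(sentences: list[str], max_chars: int) -> list[str]:
--     """Return the suffix of `sentences` that fits within max_chars."""
--     result: list[str] = []
--     total = 0
--     for sent in reversed(sentences):
--         if total + len(sent) > max_chars:
--             break
--         result.insert(0, sent)
--         total += len(sent)
--     return result
-- ===== SOURCE B (Python) =====
-- def _tail_to_fit(sentences: list[str], max_chars: int) -> list[str]:
--     """Return the suffix of `sentences` that fits within max_chars."""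
--     # cumulative lengths of trailing suffixes (monotone non-decreasing)
--     suffix_sums = []
--     total = 0
--     for s in reversed(sentences):
--         total += len(s)
--         suffix_sums.append(total)
--     # bisect_right(suffix_sums, max_chars), CPython's algorithm hand-written
--     # (this module imports nothing, so no `bisect` import)
--     lo, hi = 0, len(suffix_sums)
--     while lo < hi:
--         mid = (lo + hi) // 2
--         if max_chars < suffix_sums[mid]:
--             hi = mid
--         else:
--             lo = mid + 1
--     return sentences[len(sentences) - lo:]
-- ===== Notes on version B (the rewrite author's own statement) =====
-- stated objective: alternative
-- what changed: Replaces the reversed scan that prepends with insert(0,...) by a cumulative suffix-sum table plus a bisect_right binary search for the count, returning one slice.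
import Mathlib
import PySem

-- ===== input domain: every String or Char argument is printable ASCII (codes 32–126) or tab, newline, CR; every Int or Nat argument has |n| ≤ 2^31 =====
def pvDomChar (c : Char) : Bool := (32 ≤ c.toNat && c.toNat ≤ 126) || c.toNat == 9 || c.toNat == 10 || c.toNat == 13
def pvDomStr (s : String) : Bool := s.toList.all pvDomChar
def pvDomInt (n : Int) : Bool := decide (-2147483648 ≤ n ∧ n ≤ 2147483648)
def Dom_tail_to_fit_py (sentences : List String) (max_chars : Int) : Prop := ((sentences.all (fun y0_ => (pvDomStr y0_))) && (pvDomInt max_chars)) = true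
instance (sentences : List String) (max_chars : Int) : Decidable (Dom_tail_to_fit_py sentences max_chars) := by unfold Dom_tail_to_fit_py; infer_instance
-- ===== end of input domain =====

-- B replaces A's reversed scan with insert(0, …) by a suffix-sum table plus a
-- bisect_right binary search and one slice (alternative algorithm, same result).


-- ===== PORT A =====
-- 'for sent in reversed(sentences): if total+len(sent) > max_chars: break; result.insert(0, sent); total += len(sent)'
def tailFitLoop (max_chars : Int) : List String → List String → Int → List String
  | [], result, _ => result
  | sent :: rest, result, total =>
    if total + PySem.Str.len sent > max_chars then result
    else tailFitLoop max_chars rest (sent :: result) (total + PySem.Str.len sent)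

def tail_to_fit_py (sentences : List String) (max_chars : Int) : List String :=
  tailFitLoop max_chars sentences.reverse [] 0

-- ===== PORT B =====
def tail_to_fit_py_alt (sentences : List String) (max_chars : Int) : List String :=
  -- 'for s in reversed(sentences): total += len(s); suffix_sums.append(total)'
  let suffix_sums :=
    (sentences.reverse.foldl
      (fun (acc : List Int × Int) s =>
        (acc.1 ++ [acc.2 + PySem.Str.len s], acc.2 + PySem.Str.len s)) ([], 0)).1
  -- Source B's hand-written while-loop is exactly CPython's bisect_right; ported as the
  -- prelude's primitive for that algorithm (PySem.List.bisectRight)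
  let count := PySem.List.bisectRight suffix_sums max_chars
  -- 'sentences[len(sentences) - count:]' — count ≤ len, so the index is a Nat
  PySem.List.slice sentences (some ((sentences.length - count : Nat) : Int)) none

-- ===== PRECONDITION & SPEC =====
def Spec_tail_to_fit_py (sentences : List String) (max_chars : Int) (out : List String) : Prop := out = tail_to_fit_py_alt sentences max_chars
instance (sentences : List String) (max_chars : Int) (out : List String) : Decidable (Spec_tail_to_fit_py sentences max_chars out) := by unfold Spec_tail_to_fit_py; infer_instance

-- ===== CLAIM (what is proved, stated in full; the proofs are below) =====
def Claim_equal_tail_to_fit_py : Prop := ∀ (sentences : List String) (max_chars : Int), Dom_tail_to_fit_py sentences max_chars → Spec_tail_to_fit_py sentences max_chars (tail_to_fit_py sentences max_chars)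

-- ===== LEMMAS AND PROOFS =====

-- reference cumulative sums: acc l t = [t+|l0|, t+|l0|+|l1|, …]
def pvAcc : List String → Int → List Int
  | [], _ => []
  | s :: r, t => (t + PySem.Str.len s) :: pvAcc r (t + PySem.Str.len s)

-- reference count: number of sentences A's loop takes from the reversed list
def pvKf (max_chars : Int) : List String → Int → Nat
  | [], _ => 0
  | s :: r, t =>
    if t + PySem.Str.len s > max_chars then 0 else pvKf max_chars r (t + PySem.Str.len s) + 1

theorem pvStrLen_nonneg (s : String) : 0 ≤ PySem.Str.len s := by
  simp [PySem.Str.len_eq]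

theorem pvAcc_length (l : List String) (t : Int) : (pvAcc l t).length = l.length := by
  induction l generalizing t with
  | nil => rfl
  | cons s r ih => simp [pvAcc, ih]

theorem pvAcc_ge (l : List String) (t : Int) : ∀ e ∈ pvAcc l t, t ≤ e := by
  induction l generalizing t with
  | nil => simp [pvAcc]
  | cons s r ih =>
    intro e he
    simp only [pvAcc, List.mem_cons] at he
    have h0 := pvStrLen_nonneg s
    rcases he with h | h
    · omega
    · have := ih (t + PySem.Str.len s) e h; omega

theorem pvAcc_pairwise (l : List String) (t : Int) :
    (pvAcc l t).Pairwise (fun a b => a ≤ b) := by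
  induction l generalizing t with
  | nil => simp [pvAcc]
  | cons s r ih =>
    simp only [pvAcc, List.pairwise_cons]
    exact ⟨fun e he => pvAcc_ge r _ e he, ih _⟩

theorem pvKf_le (max_chars : Int) (l : List String) (t : Int) :
    pvKf max_chars l t ≤ l.length := by
  induction l generalizing t with
  | nil => simp [pvKf]
  | cons s r ih =>
    simp only [pvKf, List.length_cons]
    split
    · omega
    · have := ih (t + PySem.Str.len s); omega

theorem pvKf_iff (max_chars : Int) (l : List String) (t : Int) :
    ∀ i (h : i < (pvAcc l t).length), ((pvAcc l t)[i] ≤ max_chars ↔ i < pvKf max_chars l t) := by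
  induction l generalizing t with
  | nil => simp [pvAcc]
  | cons s r ih =>
    intro i h
    by_cases hb : t + PySem.Str.len s > max_chars
    · simp only [pvKf, if_pos hb]
      constructor
      · intro hle
        exfalso
        rcases i with _ | j
        · simp [pvAcc] at hle
          simp [PySem.Str.len_eq] at hb
          omega
        · simp only [pvAcc] at hle h
          have hj : j < (pvAcc r (t + PySem.Str.len s)).length := by
            simpa using h
          have hmem : (pvAcc r (t + PySem.Str.len s))[j] ∈ pvAcc r (t + PySem.Str.len s) :=
            List.getElem_mem hj
          have := pvAcc_ge r (t + PySem.Str.len s) _ hmem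
          simp only [List.getElem_cons_succ] at hle
          omega
      · omega
    · simp only [pvKf, if_neg hb]
      rcases i with _ | j
      · simp only [pvAcc, List.getElem_cons_zero]
        omega
      · simp only [pvAcc, List.getElem_cons_succ]
        have hj : j < (pvAcc r (t + PySem.Str.len s)).length := by
          simp only [pvAcc, List.length_cons] at h; omega
        rw [ih (t + PySem.Str.len s) j hj]
        omega

-- A's loop takes exactly the first pvKf elements of the (reversed) list
theorem pvLoopA_eq (max_chars : Int) (l : List String) (res : List String) (t : Int) :
    tailFitLoop max_chars l res t = (l.take (pvKf max_chars l t)).reverse ++ res := by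
  induction l generalizing res t with
  | nil => simp [tailFitLoop, pvKf]
  | cons s r ih =>
    by_cases hb : t + PySem.Str.len s > max_chars
    · simp only [tailFitLoop, pvKf, if_pos hb]
      simp
    · simp only [tailFitLoop, pvKf, if_neg hb]
      rw [ih]
      simp [List.take_succ_cons]

-- B's fold builds exactly pvAcc
theorem pvFold_acc (l : List String) (ss : List Int) (t : Int) :
    (l.foldl (fun (acc : List Int × Int) s =>
      (acc.1 ++ [acc.2 + PySem.Str.len s], acc.2 + PySem.Str.len s)) (ss, t)).1
      = ss ++ pvAcc l t := by
  induction l generalizing ss t with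
  | nil => simp [pvAcc]
  | cons s r ih =>
    simp only [List.foldl_cons]
    rw [ih]
    simp [pvAcc]

-- bisect_right on the monotone sums computes pvKf
theorem pvBisect_eq (max_chars : Int) (l : List String) :
    PySem.List.bisectRight (pvAcc l 0) max_chars = pvKf max_chars l 0 := by
  obtain ⟨hle, hlt, hgt⟩ :=
    PySem.List.bisectRight_spec (pvAcc l 0) max_chars (pvAcc_pairwise l 0)
  set b := PySem.List.bisectRight (pvAcc l 0) max_chars with hbdef
  have hkle : pvKf max_chars l 0 ≤ (pvAcc l 0).length := by
    rw [pvAcc_length]; exact pvKf_le max_chars l 0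
  rcases Nat.lt_trichotomy b (pvKf max_chars l 0) with h | h | h
  · -- b < kf: spec says max_chars < (pvAcc l 0)[b], but kf_iff says ≤
    have hb : b < (pvAcc l 0).length := by omega
    have h1 := (pvKf_iff max_chars l 0 b hb).2 h
    have h2 := hgt b hb (le_refl b)
    omega
  · exact h
  · -- kf < b: spec says (pvAcc l 0)[kf] ≤ max_chars, but kf_iff says not
    have hk : pvKf max_chars l 0 < (pvAcc l 0).length := by omega
    have h1 := hlt (pvKf max_chars l 0) hk h
    have h2 := (pvKf_iff max_chars l 0 _ hk).1 h1
    omega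

-- ===== VERDICT (by name: the statement is the Claim_ definition above) =====
theorem tail_to_fit_py_spec : Claim_equal_tail_to_fit_py := by
  intro sentences max_chars _
  unfold Spec_tail_to_fit_py tail_to_fit_py tail_to_fit_py_alt
  have hfold := pvFold_acc sentences.reverse [] 0
  rw [pvLoopA_eq, hfold]
  simp only [List.nil_append]
  rw [pvBisect_eq, PySem.List.slice_from_natCast]
  have hk : pvKf max_chars sentences.reverse 0 ≤ sentences.length := by
    have := pvKf_le max_chars sentences.reverse 0
    simpa using this
  rw [List.append_nil, List.take_reverse, List.reverse_reverse]
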